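-- pv_equiv track=rewrite | github.com/Ajayyy00/PhishGaurd-extension | backend/services/url_detector.py | _is_legitimate_brand_domain
-- ===== SOURCE A (Python) =====
-- def _is_legitimate_brand_domain(hostname: str) -> bool:
--     """Check if hostname is a legitimate brand domain."""
--     legit_domains = {
--         # Tech Giants
--         'google.com', 'youtube.com', 'microsoft.com', 'apple.com', 'amazon.com',
--         'facebook.com', 'twitter.com', 'x.com', 'linkedin.com', 'instagram.com',
--         # AI Services
--         'chatgpt.com', 'openai.com', 'anthropic.com', 'claude.ai',
--         # Dev Tools
--         'github.com', 'gitlab.com', 'stackoverflow.com', 'vercel.com',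
--         # Finance
--         'paypal.com', 'stripe.com', 'ebay.com',
--         # Entertainment
--         'netflix.com', 'spotify.com', 'twitch.tv', 'discord.com',
--         # Other
--         'reddit.com', 'wikipedia.org', 'medium.com', 'notion.so',
--         'dropbox.com', 'zoom.us', 'slack.com'
--     }
--
--     for domain in legit_domains:
--         if hostname == domain or hostname.endswith('.' + domain):
--             return True
--     return False
-- ===== SOURCE B (Python) =====
-- def _is_legitimate_brand_domain(hostname: str) -> bool:
--     """Check if hostname is a legitimate brand domain."""
--     # Every legitimate brand domain has exactly two labels (name.tld), so index
--     # the brand names by TLD and test only the hostname's last two labels.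
--     brands_by_tld = {
--         'com': {
--             'google', 'youtube', 'microsoft', 'apple', 'amazon',
--             'facebook', 'twitter', 'x', 'linkedin', 'instagram',
--             'chatgpt', 'openai', 'anthropic',
--             'github', 'gitlab', 'stackoverflow', 'vercel',
--             'paypal', 'stripe', 'ebay',
--             'netflix', 'spotify', 'discord',
--             'reddit', 'medium', 'dropbox', 'slack',
--         },
--         'ai': {'claude'},
--         'tv': {'twitch'},
--         'org': {'wikipedia'},
--         'so': {'notion'},
--         'us': {'zoom'},
--     }
--     labels = hostname.split('.')
--     if len(labels) < 2:
--         return False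
--     return labels[-2] in brands_by_tld.get(labels[-1], set())
-- ===== Notes on version B (the rewrite author's own statement) =====
-- stated objective: alternative
-- what changed: A scans all 32 full domain strings testing hostname equality or a dotted-suffix endswith for each; B instead splits the hostname into its dot-separated labels once and looks up only the last two labels in a dict of brand-name sets keyed by TLD, turning the domain scan into a single split plus one hash lookup.
import Mathlib
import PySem

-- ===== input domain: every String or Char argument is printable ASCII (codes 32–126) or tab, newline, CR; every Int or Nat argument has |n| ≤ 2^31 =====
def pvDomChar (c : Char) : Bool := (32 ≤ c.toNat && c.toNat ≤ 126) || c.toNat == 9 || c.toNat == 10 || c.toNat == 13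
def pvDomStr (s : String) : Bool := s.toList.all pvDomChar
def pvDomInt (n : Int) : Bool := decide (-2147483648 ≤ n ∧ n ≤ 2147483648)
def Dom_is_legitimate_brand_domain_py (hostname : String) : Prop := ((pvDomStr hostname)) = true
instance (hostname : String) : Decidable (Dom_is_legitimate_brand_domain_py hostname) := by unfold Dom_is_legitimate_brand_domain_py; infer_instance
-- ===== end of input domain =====

-- B replaces A's equality/endswith scan over 32 full domains by splitting the hostname into
-- its dot-separated labels and looking up only the last two in a dict keyed by TLD (objective: alternative).

-- ===== PORT A =====
-- the literal set of legitimate domains (Python set iterated; the any-result is order-independent)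
def pvLegitDomains : List String :=
  ["google.com", "youtube.com", "microsoft.com", "apple.com", "amazon.com",
   "facebook.com", "twitter.com", "x.com", "linkedin.com", "instagram.com",
   "chatgpt.com", "openai.com", "anthropic.com", "claude.ai",
   "github.com", "gitlab.com", "stackoverflow.com", "vercel.com",
   "paypal.com", "stripe.com", "ebay.com",
   "netflix.com", "spotify.com", "twitch.tv", "discord.com",
   "reddit.com", "wikipedia.org", "medium.com", "notion.so",
   "dropbox.com", "zoom.us", "slack.com"]

-- 'for domain in legit_domains: if hostname == domain or hostname.endswith('.' + domain): return True / return False'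
def is_legitimate_brand_domain_py (hostname : String) : Bool :=
  pvLegitDomains.any (fun domain =>
    hostname == domain || PySem.Str.endswith hostname ("." ++ domain))

-- ===== PORT B =====
-- 'brands_by_tld = {...}' — brand names indexed by TLD
def pvBrandsByTld : PySem.Dict String (PySem.Set String) :=
  PySem.Dict.mk
    [("com", PySem.Set.ofList
        ["google", "youtube", "microsoft", "apple", "amazon",
         "facebook", "twitter", "x", "linkedin", "instagram",
         "chatgpt", "openai", "anthropic",
         "github", "gitlab", "stackoverflow", "vercel",
         "paypal", "stripe", "ebay",
         "netflix", "spotify", "discord",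
         "reddit", "medium", "dropbox", "slack"]),
     ("ai", PySem.Set.ofList ["claude"]),
     ("tv", PySem.Set.ofList ["twitch"]),
     ("org", PySem.Set.ofList ["wikipedia"]),
     ("so", PySem.Set.ofList ["notion"]),
     ("us", PySem.Set.ofList ["zoom"])]

-- 'labels = hostname.split('.'); if len(labels) < 2: return False;
--  return labels[-2] in brands_by_tld.get(labels[-1], set())'
def is_legitimate_brand_domain_py_alt (hostname : String) : Bool :=
  match PySem.Str.split? hostname "." with
  | none => false     -- unreachable: the separator "." is nonempty
  | some labels =>
    if labels.length < 2 then false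
    else
      match PySem.List.pyGet? labels (-2), PySem.List.pyGet? labels (-1) with
      | some name, some tld =>
          PySem.Set.contains (pvBrandsByTld.getD tld PySem.Set.empty) name
      | _, _ => false   -- unreachable: len(labels) >= 2

-- ===== PRECONDITION & SPEC =====
def Spec_is_legitimate_brand_domain_py (hostname : String) (out : Bool) : Prop := out = is_legitimate_brand_domain_py_alt hostname
instance (hostname : String) (out : Bool) : Decidable (Spec_is_legitimate_brand_domain_py hostname out) := by unfold Spec_is_legitimate_brand_domain_py; infer_instance

-- ===== CLAIM (what is proved, stated in full; the proofs are below) =====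
def Claim_equal_is_legitimate_brand_domain_py : Prop := ∀ (hostname : String), Dom_is_legitimate_brand_domain_py hostname → Spec_is_legitimate_brand_domain_py hostname (is_legitimate_brand_domain_py hostname)

-- ===== LEMMAS AND PROOFS =====

-- the (name, tld) pairs of the 32 domains, in A's order
def pvPairs : List (String × String) :=
  [("google", "com"), ("youtube", "com"), ("microsoft", "com"), ("apple", "com"), ("amazon", "com"),
   ("facebook", "com"), ("twitter", "com"), ("x", "com"), ("linkedin", "com"), ("instagram", "com"),
   ("chatgpt", "com"), ("openai", "com"), ("anthropic", "com"), ("claude", "ai"),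
   ("github", "com"), ("gitlab", "com"), ("stackoverflow", "com"), ("vercel", "com"),
   ("paypal", "com"), ("stripe", "com"), ("ebay", "com"),
   ("netflix", "com"), ("spotify", "com"), ("twitch", "tv"), ("discord", "com"),
   ("reddit", "com"), ("wikipedia", "org"), ("medium", "com"), ("notion", "so"),
   ("dropbox", "com"), ("zoom", "us"), ("slack", "com")]

theorem pv_domains_eq : pvLegitDomains = pvPairs.map (fun p => p.1 ++ "." ++ p.2) := by decide

theorem pv_pairs_dotfree : ∀ p ∈ pvPairs, '.' ∉ p.1.toList ∧ '.' ∉ p.2.toList := by decide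

-- reference splitter: Python's s.split('.') computed by structural recursion on the chars
def pvSplitDots : List Char → List (List Char)
  | [] => [[]]
  | c :: r =>
    if c = '.' then [] :: pvSplitDots r
    else
      match pvSplitDots r with
      | [] => [[c]]
      | h :: t => (c :: h) :: t

theorem pvSplitDots_ne_nil (cs : List Char) : pvSplitDots cs ≠ [] := by
  match cs with
  | [] => simp [pvSplitDots]
  | c :: r =>
    unfold pvSplitDots
    split
    · simp
    · split
      · simp
      · simp

theorem pv_go_spec (cs : List Char) (fuel : Nat) (cur : List Char) (acc : List (List Char))
    (h : cs.length < fuel) :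
    PySem.Chars.splitOn.go ['.'] fuel cs cur acc =
      acc.reverse ++ (cur.reverse ++ (pvSplitDots cs).headI) :: (pvSplitDots cs).tail := by
  induction cs generalizing fuel cur acc with
  | nil =>
    match fuel, h with
    | fuel + 1, _ => simp [PySem.Chars.splitOn.go, pvSplitDots]
  | cons c r ih =>
    match fuel, h with
    | fuel + 1, h =>
      by_cases hc : c = '.'
      · subst hc
        have hpre : List.isPrefixOf ['.'] ('.' :: r) = true := by simp [List.isPrefixOf]
        rw [PySem.Chars.splitOn.go, if_pos hpre]
        have hd : List.drop (['.'] : List Char).length ('.' :: r) = r := rfl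
        simp only [List.length_cons] at h
        rw [hd, ih _ _ _ (by omega)]
        rcases hr : pvSplitDots r with _ | ⟨h0, t0⟩
        · exact absurd hr (pvSplitDots_ne_nil r)
        · simp [pvSplitDots, hr]
      · have hpre : List.isPrefixOf ['.'] (c :: r) = false := by
          simp [List.isPrefixOf]
          exact fun hh => hc hh.symm
        rw [PySem.Chars.splitOn.go, if_neg (by simp [hpre])]
        simp only [List.length_cons] at h
        rw [ih _ _ _ (by omega)]
        rcases hr : pvSplitDots r with _ | ⟨h0, t0⟩
        · exact absurd hr (pvSplitDots_ne_nil r)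
        · simp [pvSplitDots, hc, hr]

theorem pv_splitOn_eq (cs : List Char) : PySem.Chars.splitOn cs ['.'] = pvSplitDots cs := by
  unfold PySem.Chars.splitOn
  rw [pv_go_spec cs (cs.length + 1) [] [] (by omega)]
  rcases hr : pvSplitDots cs with _ | ⟨h0, t0⟩
  · exact absurd hr (pvSplitDots_ne_nil cs)
  · simp

theorem pvSplitDots_append_dot (u v : List Char) :
    pvSplitDots (u ++ '.' :: v) = pvSplitDots u ++ pvSplitDots v := by
  induction u with
  | nil => simp [pvSplitDots]
  | cons c u ih =>
    by_cases hc : c = '.'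
    · subst hc; simp [pvSplitDots, ih]
    · simp only [List.cons_append]
      unfold pvSplitDots
      rw [if_neg hc, if_neg hc, ih]
      rcases hr : pvSplitDots u with _ | ⟨h0, t0⟩
      · exact absurd hr (pvSplitDots_ne_nil u)
      · simp
        rw [← pvSplitDots.eq_def]

theorem pvSplitDots_dotfree (cs : List Char) (h : '.' ∉ cs) : pvSplitDots cs = [cs] := by
  induction cs with
  | nil => rfl
  | cons c r ih =>
    simp only [List.mem_cons, not_or] at h
    unfold pvSplitDots
    rw [if_neg (fun hh => h.1 hh.symm), ih h.2]

-- inverse of the splitter: '.'.join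
def pvJoinDots : List (List Char) → List Char
  | [] => []
  | [x] => x
  | x :: y :: t => x ++ '.' :: pvJoinDots (y :: t)

theorem pvJoinDots_splitDots (cs : List Char) : pvJoinDots (pvSplitDots cs) = cs := by
  induction cs with
  | nil => rfl
  | cons c r ih =>
    by_cases hc : c = '.'
    · subst hc
      simp only [pvSplitDots]
      rcases hr : pvSplitDots r with _ | ⟨h0, t0⟩
      · exact absurd hr (pvSplitDots_ne_nil r)
      · rw [hr] at ih; simp [pvJoinDots, ih]
    · simp only [pvSplitDots, if_neg hc]
      rcases hr : pvSplitDots r with _ | ⟨h0, t0⟩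
      · exact absurd hr (pvSplitDots_ne_nil r)
      · rw [hr] at ih
        rcases t0 with _ | ⟨t1, t2⟩
        · simp [pvJoinDots] at ih ⊢; rw [ih]
        · simp [pvJoinDots] at ih ⊢; exact ih

theorem pvJoinDots_append_two (L : List (List Char)) (n t : List Char) (hL : L ≠ []) :
    pvJoinDots (L ++ [n, t]) = pvJoinDots L ++ '.' :: (n ++ '.' :: t) := by
  induction L with
  | nil => exact absurd rfl hL
  | cons x L ih =>
    rcases L with _ | ⟨y, L'⟩
    · rfl
    · show x ++ '.' :: pvJoinDots ((y :: L') ++ [n, t]) =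
        (x ++ '.' :: pvJoinDots (y :: L')) ++ '.' :: (n ++ '.' :: t)
      rw [ih (by simp)]
      simp

-- the heart: A's per-domain test holds iff the last two labels are (n, t)
theorem pv_test_iff (cs n t : List Char) (hn : '.' ∉ n) (ht : '.' ∉ t) :
    (cs = n ++ '.' :: t ∨ ('.' :: (n ++ '.' :: t)) <:+ cs) ↔
      ∃ L, pvSplitDots cs = L ++ [n, t] := by
  constructor
  · rintro (rfl | ⟨u, rfl⟩)
    · refine ⟨[], ?_⟩
      rw [pvSplitDots_append_dot, pvSplitDots_dotfree n hn, pvSplitDots_dotfree t ht]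
      rfl
    · refine ⟨pvSplitDots u, ?_⟩
      rw [pvSplitDots_append_dot, pvSplitDots_append_dot, pvSplitDots_dotfree n hn,
          pvSplitDots_dotfree t ht]
      rfl
  · rintro ⟨L, hL⟩
    have hjoin := pvJoinDots_splitDots cs
    rw [hL] at hjoin
    rcases L with _ | ⟨x, L'⟩
    · left; rw [← hjoin]; rfl
    · right
      rw [pvJoinDots_append_two _ _ _ (by simp)] at hjoin
      exact ⟨pvJoinDots (x :: L'), by rw [← hjoin]⟩

-- A characterised through pvSplitDots
theorem pv_A_iff (hostname : String) :
    is_legitimate_brand_domain_py hostname = true ↔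
      ∃ p ∈ pvPairs, ∃ L, pvSplitDots hostname.toList = L ++ [p.1.toList, p.2.toList] := by
  unfold is_legitimate_brand_domain_py
  rw [pv_domains_eq, List.any_map, List.any_eq_true]
  refine exists_congr fun p => and_congr_right fun hp => ?_
  obtain ⟨hn, ht⟩ := pv_pairs_dotfree p hp
  rw [← pv_test_iff hostname.toList p.1.toList p.2.toList hn ht]
  simp only [Function.comp, Bool.or_eq_true, beq_iff_eq, PySem.Str.endswith_eq,
    PySem.Chars.endswith_iff]
  constructor
  · rintro (rfl | hsuf)
    · left; simp [String.toList_append]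
    · right
      have : ("." ++ (p.1 ++ "." ++ p.2)).toList = '.' :: (p.1.toList ++ '.' :: p.2.toList) := by
        simp [String.toList_append]
      rwa [this] at hsuf
  · rintro (heq | hsuf)
    · left
      apply String.toList_injective
      simp [String.toList_append, heq]
    · right
      have : ("." ++ (p.1 ++ "." ++ p.2)).toList = '.' :: (p.1.toList ++ '.' :: p.2.toList) := by
        simp [String.toList_append]
      rwa [this]

-- the TLD-table lookup agrees with membership in the flat pair list
theorem pv_lookup_iff (n t : String) :
    PySem.Set.contains (pvBrandsByTld.getD t PySem.Set.empty) n = true ↔ (n, t) ∈ pvPairs := by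
  by_cases h1 : "com" = t
  · subst h1
    simp [pvBrandsByTld, PySem.Dict.getD, PySem.Dict.get?_mk_cons, PySem.Set.contains,
      List.contains_eq_mem, PySem.Set.mem_ofList, pvPairs]
  · by_cases h2 : "ai" = t
    · subst h2
      simp [pvBrandsByTld, PySem.Dict.getD, PySem.Dict.get?_mk_cons, PySem.Set.contains,
        List.contains_eq_mem, PySem.Set.mem_ofList, pvPairs]
    · by_cases h3 : "tv" = t
      · subst h3
        simp [pvBrandsByTld, PySem.Dict.getD, PySem.Dict.get?_mk_cons, PySem.Set.contains,
          List.contains_eq_mem, PySem.Set.mem_ofList, pvPairs]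
      · by_cases h4 : "org" = t
        · subst h4
          simp [pvBrandsByTld, PySem.Dict.getD, PySem.Dict.get?_mk_cons, PySem.Set.contains,
            List.contains_eq_mem, PySem.Set.mem_ofList, pvPairs]
        · by_cases h5 : "so" = t
          · subst h5
            simp [pvBrandsByTld, PySem.Dict.getD, PySem.Dict.get?_mk_cons, PySem.Set.contains,
              List.contains_eq_mem, PySem.Set.mem_ofList, pvPairs]
          · by_cases h6 : "us" = t
            · subst h6
              simp [pvBrandsByTld, PySem.Dict.getD, PySem.Dict.get?_mk_cons, PySem.Set.contains,
                List.contains_eq_mem, PySem.Set.mem_ofList, pvPairs]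
            · have e1 : ("com" == t) = false := beq_eq_false_iff_ne.mpr h1
              have e2 : ("ai" == t) = false := beq_eq_false_iff_ne.mpr h2
              have e3 : ("tv" == t) = false := beq_eq_false_iff_ne.mpr h3
              have e4 : ("org" == t) = false := beq_eq_false_iff_ne.mpr h4
              have e5 : ("so" == t) = false := beq_eq_false_iff_ne.mpr h5
              have e6 : ("us" == t) = false := beq_eq_false_iff_ne.mpr h6
              have h1' : t ≠ "com" := fun h => h1 h.symm
              have h2' : t ≠ "ai" := fun h => h2 h.symm
              have h3' : t ≠ "tv" := fun h => h3 h.symm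
              have h4' : t ≠ "org" := fun h => h4 h.symm
              have h5' : t ≠ "so" := fun h => h5 h.symm
              have h6' : t ≠ "us" := fun h => h6 h.symm
              simp [pvBrandsByTld, PySem.Dict.getD, PySem.Dict.get?, List.find?,
                PySem.Set.contains, List.contains_eq_mem, PySem.Set.empty, pvPairs,
                e1, e2, e3, e4, e5, e6, h1', h2', h3', h4', h5', h6']

-- negative indexing of the last two elements
theorem pv_pyGet_neg_two {α : Type} (M : List α) (a b : α) :
    PySem.List.pyGet? (M ++ [a, b]) (-2) = some a := by
  have hlen : (M ++ [a, b]).length = M.length + 2 := by simp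
  simp only [PySem.List.pyGet?, PySem.List.pyIdx?, hlen]
  rw [if_neg (by omega), if_pos (by push_cast; omega)]
  have h2 : (-(-2 : Int)).toNat = 2 := rfl
  have h3 : M.length + 2 - 2 = M.length := by omega
  rw [h2, h3]
  simp only [Option.bind]
  rw [List.getElem?_append_right (Nat.le_refl _)]
  simp

theorem pv_pyGet_neg_one {α : Type} (M : List α) (a b : α) :
    PySem.List.pyGet? (M ++ [a, b]) (-1) = some b := by
  have hlen : (M ++ [a, b]).length = M.length + 2 := by simp
  simp only [PySem.List.pyGet?, PySem.List.pyIdx?, hlen]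
  rw [if_neg (by omega), if_pos (by push_cast; omega)]
  have h2 : (-(-1 : Int)).toNat = 1 := rfl
  have h3 : M.length + 2 - 1 = M.length + 1 := by omega
  rw [h2, h3]
  simp only [Option.bind]
  rw [List.getElem?_append_right (by omega)]
  have h4 : M.length + 1 - M.length = 1 := by omega
  rw [h4]
  simp

-- B's labels are the splitter's pieces, as Strings
theorem pv_B_labels (hostname : String) :
    PySem.Str.split? hostname "." = some ((pvSplitDots hostname.toList).map String.ofList) := by
  unfold PySem.Str.split? PySem.Chars.split?
  rw [show ("." : String).toList = ['.'] from rfl]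
  simp [pv_splitOn_eq]

-- ===== VERDICT (by name: the statement is the Claim_ definition above) =====
theorem is_legitimate_brand_domain_py_spec : Claim_equal_is_legitimate_brand_domain_py := by
  intro hostname _
  unfold Spec_is_legitimate_brand_domain_py
  unfold is_legitimate_brand_domain_py_alt
  rw [pv_B_labels]
  rcases hr : (pvSplitDots hostname.toList).reverse with _ | ⟨b, _ | ⟨a, Lr⟩⟩
  · exact absurd (by simpa using congrArg List.reverse hr) (pvSplitDots_ne_nil hostname.toList)
  · -- one label: both sides false
    have hls : pvSplitDots hostname.toList = [b] := by
      simpa using congrArg List.reverse hr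
    rw [Bool.eq_iff_iff, pv_A_iff, hls]
    simp only [List.map_cons, List.map_nil, List.length_cons, List.length_nil]
    rw [if_pos (by omega)]
    simp only [Bool.false_eq_true, iff_false, not_exists]
    rintro p ⟨hp, L, hL⟩
    have := congrArg List.length hL
    simp at this
  · -- at least two labels: compare lookups
    have hls : pvSplitDots hostname.toList = Lr.reverse ++ [a, b] := by
      have := congrArg List.reverse hr
      simpa using this
    rw [Bool.eq_iff_iff, pv_A_iff, hls]
    simp only [List.map_append, List.map_cons, List.map_nil]
    rw [if_neg (by simp)]
    rw [pv_pyGet_neg_two, pv_pyGet_neg_one]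
    rw [pv_lookup_iff]
    constructor
    · rintro ⟨p, hp, L, hL⟩
      obtain ⟨hL', hnt⟩ := List.append_inj' hL (by simp)
      simp only [List.cons.injEq, and_true] at hnt
      obtain ⟨hn, ht⟩ := hnt
      have h1 : String.ofList a = p.1 := by rw [hn, String.ofList_toList]
      have h2 : String.ofList b = p.2 := by rw [ht, String.ofList_toList]
      rw [h1, h2]
      exact hp
    · intro hp
      exact ⟨(String.ofList a, String.ofList b), hp, Lr.reverse, by simp⟩
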